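-- pv_equiv track=rewrite | github.com/Ssxpn/BD-1_TTS | text_to_speech_v0.py | decompose_message
-- ===== SOURCE A (Python) =====
-- import string
-- import unicodedata
--
-- def decompose_message(message):
--     def _extract_consonnes(message, min_word_len):
--         vowels = "aeiou"
--         consonnes = []
--         exceptions = {}  # {"je", "tu", "il", "on", "yo"}
--         force_include = {}  # {"bd-1"}
--
--         words = message.split()
--
--         for word in words:
--             cleaned = word.strip(string.punctuation)
--
--             if cleaned in force_include:
--                 for c in cleaned:
--                     if c.isalpha() and c not in vowels:
--                         consonnes.append(c)
--                 consonnes.append(' ')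
--                 continue
--
--             if len(cleaned) <= min_word_len and cleaned not in exceptions:
--                 continue
--
--             i = 0
--             while i < len(cleaned) - 1:
--                 c1 = cleaned[i]
--                 c2 = cleaned[i + 1]
--
--                 if c2 in vowels and c1.isalpha() and c1 not in vowels:
--                     j = i - 1
--                     stack = [c1]
--                     while j >= 0 and cleaned[j].isalpha() and cleaned[j] not in vowels:
--                         stack.insert(0, cleaned[j])
--                         j -= 1
--                     consonnes.extend(stack)
--                     i += 2
--                 else:
--                     i += 1
--
--             consonnes.append(' ')
--         return consonnes
--
--     # 🔹 Minuscule + suppression des accents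
--     message = message.lower()
--     message = message.replace("'", " ")
--     message = ''.join(
--         c for c in unicodedata.normalize('NFD', message)
--         if unicodedata.category(c) != 'Mn'
--     )
--
--     # 🔹 Première passe (mots de +4 lettres)
--     consonnes = _extract_consonnes(message, min_word_len=4)
--
--     # 🔹 Seconde passe si vide (mots de +2 lettres)
--     if not [c for c in consonnes if c.strip()]:
--         consonnes = _extract_consonnes(message, min_word_len=3)
--
--     return consonnes
-- ===== SOURCE B (Python) =====
-- import string
-- import unicodedata
--
-- def decompose_message(message):
--     vowels = set("aeiou")
--
--     def _clean(msg):
--         msg = msg.lower().replace("'", " ")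
--         return ''.join(c for c in unicodedata.normalize('NFD', msg)
--                        if unicodedata.category(c) != 'Mn')
--
--     def _extract(msg, min_word_len):
--         out = []
--         for word in msg.split():
--             cleaned = word.strip(string.punctuation)
--             if len(cleaned) <= min_word_len:
--                 continue
--             run = []
--             for c in cleaned:
--                 if c in vowels:
--                     out.extend(run)
--                     run = []
--                 elif c.isalpha():
--                     run.append(c)
--                 else:
--                     run = []
--             out.append(' ')
--         return out
--
--     msg = _clean(message)
--     out = _extract(msg, 4)
--     if all(c == ' ' for c in out):
--         out = _extract(msg, 3)
--     return out
-- ===== Notes on version B (the rewrite author's own statement) =====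
-- stated objective: faster
-- what changed: Per word, the forward scan over index pairs (i,i+1) with a backward inner while-loop that re-reads and stacks the consonant run before each vowel is replaced by a single forward pass keeping the current consonant run in an accumulator and flushing it at each vowel (resetting on any other non-consonant character); the lowercase/apostrophe/NFD wrapper, punctuation strip, short-word skip and two-pass retry are unchanged.
import Mathlib
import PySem

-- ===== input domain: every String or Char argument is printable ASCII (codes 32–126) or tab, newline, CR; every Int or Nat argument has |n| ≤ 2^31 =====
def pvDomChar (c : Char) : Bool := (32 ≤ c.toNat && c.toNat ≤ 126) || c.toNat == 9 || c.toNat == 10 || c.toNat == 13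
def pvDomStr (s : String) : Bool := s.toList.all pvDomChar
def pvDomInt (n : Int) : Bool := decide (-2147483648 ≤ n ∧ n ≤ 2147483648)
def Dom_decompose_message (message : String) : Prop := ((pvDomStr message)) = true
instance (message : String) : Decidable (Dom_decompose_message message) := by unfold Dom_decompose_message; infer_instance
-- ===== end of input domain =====

-- B replaces A's forward scan with a backward stack-walk per consonant run by a single
-- forward pass keeping the current consonant run and flushing it at each vowel
-- (objective: faster — each character is read once instead of runs being re-read backwards).

-- ===== PORT A =====
-- string.punctuation
def pvPunctA : List Char := "!\"#$%&'()*+,-./:;<=>?@[\\]^_`{|}~".toList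
-- c in "aeiou"
def pvVowelA (c : Char) : Bool := c = 'a' || c = 'e' || c = 'i' || c = 'o' || c = 'u'

-- inner while: j = i-1; while j >= 0 and cleaned[j].isalpha() and cleaned[j] not in vowels:
--   stack.insert(0, cleaned[j]); j -= 1   (argument is j+1, i.e. the count of chars left of the stack)
def pvBackA (cs : List Char) : Nat → List Char → List Char
  | 0, stack => stack
  | j + 1, stack =>
      let c := cs.getD j ' '   -- index always in range when called from pvLoopA
      if PySem.Chars.isalpha c && !pvVowelA c then pvBackA cs j (c :: stack) else stack

-- outer while i < len(cleaned) - 1 (indices i, i+1 are always in range, so getD is exact)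
def pvLoopA (cs : List Char) (i : Nat) (acc : List String) : List String :=
  if i + 1 < cs.length then
    let c1 := cs.getD i ' '
    let c2 := cs.getD (i + 1) ' '
    if pvVowelA c2 && (PySem.Chars.isalpha c1 && !pvVowelA c1) then
      pvLoopA cs (i + 2) (acc ++ (pvBackA cs i [c1]).map (fun c => String.ofList [c]))
    else
      pvLoopA cs (i + 1) acc
  else acc
termination_by cs.length - i
decreasing_by all_goals omega

-- _extract_consonnes; `exceptions` and `force_include` are EMPTY dicts in A, so the
-- force_include branch never fires and `cleaned not in exceptions` is always true.
def pvExtractA (msg : List Char) (minLen : Nat) : List String :=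
  (PySem.Chars.split₀ msg).foldl
    (fun acc word =>
      let cleaned := PySem.Chars.stripChars word pvPunctA
      if cleaned.length ≤ minLen then acc
      else pvLoopA cleaned 0 acc ++ [" "])
    []

def decompose_message (message : String) : List String :=
  -- lower + replace("'", " "); the NFD/Mn accent-stripping join is the identity on the ASCII domain
  let msg := PySem.Chars.replace (PySem.Chars.lower message.toList) ['\''] [' ']
  let consonnes := pvExtractA msg 4
  -- if not [c for c in consonnes if c.strip()]
  if (consonnes.filter (fun s => !(PySem.Chars.strip s.toList).isEmpty)).isEmpty then
    pvExtractA msg 3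
  else consonnes

-- ===== PORT B =====
def pvPunctB : List Char := "!\"#$%&'()*+,-./:;<=>?@[\\]^_`{|}~".toList
-- vowels = set("aeiou")
def pvVowelsB : List Char := PySem.Set.ofList ['a', 'e', 'i', 'o', 'u']

-- one character of the single forward pass: state = (out, run)
def pvStepB (p : List String × List Char) (c : Char) : List String × List Char :=
  if c ∈ pvVowelsB then (p.1 ++ p.2.map (fun d => String.ofList [d]), [])
  else if PySem.Chars.isalpha c then (p.1, p.2 ++ [c])
  else (p.1, [])

def pvExtractB (msg : List Char) (minLen : Nat) : List String :=
  (PySem.Chars.split₀ msg).foldl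
    (fun acc word =>
      let cleaned := PySem.Chars.stripChars word pvPunctB
      if cleaned.length ≤ minLen then acc
      else (cleaned.foldl pvStepB (acc, [])).1 ++ [" "])
    []

def pvCleanB (msg : List Char) : List Char :=
  -- lower + replace("'", " "); the NFD/Mn accent-stripping join is the identity on the ASCII domain
  PySem.Chars.replace (PySem.Chars.lower msg) ['\''] [' ']

def decompose_message_alt (message : String) : List String :=
  let msg := pvCleanB message.toList
  let out := pvExtractB msg 4
  if out.all (fun c => c == " ") then pvExtractB msg 3 else out

-- ===== PRECONDITION & SPEC =====
def Spec_decompose_message (message : String) (out : List String) : Prop := out = decompose_message_alt message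
instance (message : String) (out : List String) : Decidable (Spec_decompose_message message out) := by unfold Spec_decompose_message; infer_instance

-- ===== CLAIM (what is proved, stated in full; the proofs are below) =====
def Claim_equal_decompose_message : Prop := ∀ (message : String), Dom_decompose_message message → Spec_decompose_message message (decompose_message message)

-- ===== LEMMAS AND PROOFS =====

def pvSingle (c : Char) : String := String.ofList [c]
def pvCons (c : Char) : Bool := PySem.Chars.isalpha c && !pvVowelA c

-- canonical per-word emission: forward over the word with the pending consonant run
def pvGo : List Char → List Char → List Char
  | [], _ => []
  | c :: rest, run =>
      if pvVowelA c then run ++ pvGo rest []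
      else if PySem.Chars.isalpha c then pvGo rest (run ++ [c])
      else pvGo rest []

-- maximal consonant suffix of a prefix of the word
def pvSuf (pre : List Char) : List Char :=
  pre.foldl (fun r c => if pvCons c then r ++ [c] else []) []

theorem pv_mem_vow (c : Char) : c ∈ pvVowelsB ↔ pvVowelA c = true := by
  have h : pvVowelsB = ['a', 'e', 'i', 'o', 'u'] := by decide
  simp only [h, pvVowelA, List.mem_cons, List.not_mem_nil, or_false, Bool.or_eq_true,
    decide_eq_true_eq]
  tauto

theorem pv_vow_not_cons (c : Char) (h : pvVowelA c = true) : pvCons c = false := by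
  simp [pvCons, h]

theorem pvSuf_append (pre : List Char) (c : Char) :
    pvSuf (pre ++ [c]) = if pvCons c then pvSuf pre ++ [c] else [] := by
  simp [pvSuf, List.foldl_append]

theorem pvStepB_foldl (cs : List Char) : ∀ (acc : List String) (run : List Char),
    (cs.foldl pvStepB (acc, run)).1 = acc ++ (pvGo cs run).map pvSingle := by
  induction cs with
  | nil => intro acc run; simp [pvGo]
  | cons c rest ih =>
      intro acc run
      by_cases hv : pvVowelA c = true
      · have hm : c ∈ pvVowelsB := (pv_mem_vow c).mpr hv
        simp only [List.foldl_cons, pvStepB, if_pos hm]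
        rw [ih]
        simp [pvGo, hv, pvSingle]
      · have hm : c ∉ pvVowelsB := fun h => hv ((pv_mem_vow c).mp h)
        by_cases ha : PySem.Chars.isalpha c = true
        · simp only [List.foldl_cons, pvStepB, if_neg hm, if_pos ha]
          rw [ih]
          simp [pvGo, hv, ha]
        · simp only [List.foldl_cons, pvStepB, if_neg hm, if_neg ha]
          rw [ih]
          simp [pvGo, hv, ha]

theorem pvBackA_eq (pre : List Char) : ∀ (suf stack : List Char),
    pvBackA (pre ++ suf) pre.length stack = pvSuf pre ++ stack := by
  induction pre using List.reverseRecOn with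
  | nil => intro suf stack; simp [pvBackA, pvSuf]
  | append_singleton pre' c ih =>
      intro suf stack
      have hlen : (pre' ++ [c]).length = pre'.length + 1 := by simp
      have hcs : (pre' ++ [c]) ++ suf = pre' ++ (c :: suf) := by simp
      have hget : (pre' ++ (c :: suf)).getD pre'.length ' ' = c := by
        rw [List.getD_eq_getElem?_getD, List.getElem?_append_right (Nat.le_refl _)]
        simp
      rw [hcs, hlen]
      show (if PySem.Chars.isalpha ((pre' ++ (c :: suf)).getD pre'.length ' ') &&
              !pvVowelA ((pre' ++ (c :: suf)).getD pre'.length ' ') then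
              pvBackA (pre' ++ (c :: suf)) pre'.length
                (((pre' ++ (c :: suf)).getD pre'.length ' ') :: stack)
            else stack) = pvSuf (pre' ++ [c]) ++ stack
      rw [hget, pvSuf_append]
      by_cases hc : pvCons c = true
      · rw [if_pos (by simpa [pvCons] using hc), if_pos hc, ih (c :: suf) (c :: stack)]
        simp
      · rw [if_neg (by simpa [pvCons] using hc), if_neg hc]
        simp

theorem pvLoopA_eq (n : Nat) : ∀ (suf pre : List Char) (acc : List String), suf.length = n →
    (∀ c, suf.head? = some c → pvVowelA c = true → pvSuf pre = []) →
    pvLoopA (pre ++ suf) pre.length acc = acc ++ (pvGo suf (pvSuf pre)).map pvSingle := by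
  induction n using Nat.strong_induction_on with
  | _ n ih =>
    intro suf pre acc hlen hv
    match suf, hlen with
    | [], hlen =>
        rw [pvLoopA]
        rw [if_neg (by simp)]
        simp [pvGo]
    | [c1], hlen =>
        rw [pvLoopA]
        rw [if_neg (by simp)]
        by_cases hv1 : pvVowelA c1 = true
        · have := hv c1 rfl hv1
          simp [pvGo, hv1, this]
        · by_cases ha1 : PySem.Chars.isalpha c1 = true <;> simp [pvGo, hv1, ha1]
    | c1 :: c2 :: rest, hlen =>
        have hn : rest.length + 2 = n := by simpa using hlen
        have hc1 : (pre ++ (c1 :: c2 :: rest)).getD pre.length ' ' = c1 := by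
          rw [List.getD_eq_getElem?_getD, List.getElem?_append_right (Nat.le_refl _)]
          simp
        have hc2 : (pre ++ (c1 :: c2 :: rest)).getD (pre.length + 1) ' ' = c2 := by
          rw [List.getD_eq_getElem?_getD,
            List.getElem?_append_right (Nat.le_succ_of_le (Nat.le_refl _))]
          simp
        rw [pvLoopA]
        rw [if_pos (by simp only [List.length_append, List.length_cons]; omega)]
        simp only [hc1, hc2]
        by_cases hb : (pvVowelA c2 && (PySem.Chars.isalpha c1 && !pvVowelA c1)) = true
        · rw [if_pos hb]
          rcases Bool.and_eq_true_iff.mp hb with ⟨hv2, hb2⟩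
          rcases Bool.and_eq_true_iff.mp hb2 with ⟨ha1, hnv1⟩
          have hvow1 : pvVowelA c1 = false := by simpa using hnv1
          have hback : pvBackA (pre ++ (c1 :: c2 :: rest)) pre.length [c1]
              = pvSuf pre ++ [c1] := pvBackA_eq pre _ [c1]
          rw [hback]
          have hsplit : pre ++ (c1 :: c2 :: rest) = (pre ++ [c1, c2]) ++ rest := by simp
          have hlen2 : pre.length + 2 = (pre ++ [c1, c2]).length := by simp
          have hsuf2 : pvSuf (pre ++ [c1, c2]) = [] := by
            have : pre ++ [c1, c2] = (pre ++ [c1]) ++ [c2] := by simp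
            rw [this, pvSuf_append, if_neg (by simp [pv_vow_not_cons c2 hv2])]
          rw [hsplit, hlen2,
            ih rest.length (by omega) rest (pre ++ [c1, c2]) _ rfl
              (by intro c _ _; exact hsuf2)]
          rw [hsuf2]
          simp [pvGo, hvow1, ha1, hv2, pvSingle]
        · rw [if_neg hb]
          have hsplit : pre ++ (c1 :: c2 :: rest) = (pre ++ [c1]) ++ (c2 :: rest) := by simp
          have hlen1 : pre.length + 1 = (pre ++ [c1]).length := by simp
          by_cases hv1 : pvVowelA c1 = true
          · have hsp : pvSuf pre = [] := hv c1 rfl hv1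
            have hsuf1 : pvSuf (pre ++ [c1]) = [] := by
              rw [pvSuf_append, if_neg (by simp [pv_vow_not_cons c1 hv1])]
            rw [hsplit, hlen1,
              ih (rest.length + 1) (by omega) (c2 :: rest) (pre ++ [c1]) _ rfl
                (by intro c _ _; exact hsuf1)]
            rw [hsuf1]
            simp [pvGo, hv1, hsp]
          · by_cases ha1 : PySem.Chars.isalpha c1 = true
            · have hcons1 : pvCons c1 = true := by simp [pvCons, ha1, hv1]
              have hv2 : pvVowelA c2 = false := by
                by_contra h
                exact hb (by simp at h ⊢; simp [h, ha1, hv1])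
              have hsuf1 : pvSuf (pre ++ [c1]) = pvSuf pre ++ [c1] := by
                rw [pvSuf_append, if_pos hcons1]
              rw [hsplit, hlen1,
                ih (rest.length + 1) (by omega) (c2 :: rest) (pre ++ [c1]) _ rfl
                  (by intro c hc hcv; cases Option.some.inj hc; rw [hcv] at hv2; cases hv2)]
              rw [hsuf1]
              simp [pvGo, hv1, ha1]
            · have hsuf1 : pvSuf (pre ++ [c1]) = [] := by
                rw [pvSuf_append, if_neg (by simp [pvCons, ha1])]
              rw [hsplit, hlen1,
                ih (rest.length + 1) (by omega) (c2 :: rest) (pre ++ [c1]) _ rfl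
                  (by intro c _ _; exact hsuf1)]
              rw [hsuf1]
              simp [pvGo, hv1, ha1]

theorem pvLoopA_zero (cleaned : List Char) (acc : List String) :
    pvLoopA cleaned 0 acc = acc ++ (pvGo cleaned []).map pvSingle := by
  have h := pvLoopA_eq cleaned.length cleaned [] acc rfl
    (by intro c _ _; rfl)
  simpa [pvSuf] using h

theorem pvExtract_eq (msg : List Char) (m : Nat) : pvExtractA msg m = pvExtractB msg m := by
  unfold pvExtractA pvExtractB
  congr 1
  funext acc word
  have hp : pvPunctA = pvPunctB := rfl
  rw [hp]
  by_cases hl : (PySem.Chars.stripChars word pvPunctB).length ≤ m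
  · simp only [if_pos hl]
  · simp only [if_neg hl]
    rw [pvLoopA_zero, pvStepB_foldl]

-- every character pvGo emits is a consonant letter
theorem pvGo_cons (cs : List Char) : ∀ (run : List Char), (∀ c ∈ run, pvCons c = true) →
    ∀ c ∈ pvGo cs run, pvCons c = true := by
  induction cs with
  | nil => intro run _ c hc; simp [pvGo] at hc
  | cons d rest ih =>
      intro run hrun c hc
      by_cases hv : pvVowelA d = true
      · simp only [pvGo, if_pos hv, List.mem_append] at hc
        rcases hc with hc | hc
        · exact hrun c hc
        · exact ih [] (by intro x hx; cases hx) c hc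
      · by_cases ha : PySem.Chars.isalpha d = true
        · simp only [pvGo, if_neg hv, if_pos ha] at hc
          exact ih (run ++ [d]) (by
            intro x hx
            rcases List.mem_append.mp hx with hx | hx
            · exact hrun x hx
            · simp at hx; subst hx; simp [pvCons, ha, hv]) c hc
        · simp only [pvGo, if_neg hv, if_neg ha] at hc
          exact ih [] (by intro x hx; cases hx) c hc

def pvElemInv (s : String) : Prop := s = " " ∨ ∃ c, pvCons c = true ∧ s = pvSingle c

theorem pvExtractB_inv (msg : List Char) (m : Nat) :
    ∀ s ∈ pvExtractB msg m, pvElemInv s := by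
  unfold pvExtractB
  suffices h : ∀ (ws : List (List Char)) (acc : List String), (∀ s ∈ acc, pvElemInv s) →
      ∀ s ∈ ws.foldl (fun acc word =>
        let cleaned := PySem.Chars.stripChars word pvPunctB
        if cleaned.length ≤ m then acc
        else (cleaned.foldl pvStepB (acc, [])).1 ++ [" "]) acc, pvElemInv s by
    exact h _ [] (by intro s hs; cases hs)
  intro ws
  induction ws with
  | nil => intro acc hacc s hs; exact hacc s hs
  | cons w rest ih =>
      intro acc hacc s hs
      refine ih _ ?_ s hs
      intro t ht
      by_cases hl : (PySem.Chars.stripChars w pvPunctB).length ≤ m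
      · simp only [if_pos hl] at ht; exact hacc t ht
      · simp only [if_neg hl, pvStepB_foldl] at ht
        rcases List.mem_append.mp ht with ht | ht
        · rcases List.mem_append.mp ht with ht | ht
          · exact hacc t ht
          · rcases List.mem_map.mp ht with ⟨c, hc, rfl⟩
            exact Or.inr ⟨c, pvGo_cons _ [] (by intro x hx; cases hx) c hc, rfl⟩
        · simp at ht; subst ht; exact Or.inl rfl

theorem pv_cons_char (c : Char) (h : pvCons c = true) :
    PySem.Chars.isspace c = false ∧ c ≠ ' ' := by
  have ha : PySem.Chars.isalpha c = true := (Bool.and_eq_true_iff.mp h).1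
  constructor
  · have hA : 'A'.val.toNat = 65 := rfl
    have hZ : 'Z'.val.toNat = 90 := rfl
    have ha' : 'a'.val.toNat = 97 := rfl
    have hz : 'z'.val.toNat = 122 := rfl
    simp only [PySem.Chars.isalpha, PySem.Chars.isupper, PySem.Chars.islower,
      Bool.or_eq_true, decide_eq_true_eq, Bool.and_eq_true, Char.le_def,
      UInt32.le_iff_toNat_le, hA, hZ, ha', hz] at ha
    simp only [PySem.Chars.isspace, Bool.or_eq_false_iff, Bool.and_eq_false_iff,
      decide_eq_false_iff_not, Char.toNat]
    omega
  · intro hc; subst hc; exact absurd ha (by decide)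

theorem pvCond_eq (L : List String) (hinv : ∀ s ∈ L, pvElemInv s) :
    (L.filter (fun s => !(PySem.Chars.strip s.toList).isEmpty)).isEmpty
      = L.all (fun c => c == " ") := by
  induction L with
  | nil => rfl
  | cons s rest ih =>
      have hs := hinv s List.mem_cons_self
      have hrest := ih (fun t ht => hinv t (List.mem_cons_of_mem s ht))
      rcases hs with rfl | ⟨c, hc, rfl⟩
      · have h1 : (!(PySem.Chars.strip (" " : String).toList).isEmpty) = false := by decide
        have h2 : ((" " : String) == " ") = true := by decide
        simp only [List.filter_cons, h1, List.all_cons, h2, Bool.true_and]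
        exact hrest
      · obtain ⟨hsp, hne⟩ := pv_cons_char c hc
        have htl : (pvSingle c).toList = [c] := by simp [pvSingle]
        have h1 : (!(PySem.Chars.strip (pvSingle c).toList).isEmpty) = true := by
          rw [htl]
          simp [PySem.Chars.strip, PySem.Chars.lstrip, PySem.Chars.rstrip, hsp]
        have h2 : ((pvSingle c) == " ") = false := by
          rw [beq_eq_false_iff_ne]
          intro hcontra
          have := congrArg String.toList hcontra
          rw [htl] at this
          exact hne (by simpa using List.head_eq_of_cons_eq this)
        simp only [List.filter_cons, h1, List.all_cons, h2, Bool.false_and]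
        simp

theorem pvFinal (msg : List Char) :
    (if ((pvExtractA msg 4).filter (fun s => !(PySem.Chars.strip s.toList).isEmpty)).isEmpty then
      pvExtractA msg 3 else pvExtractA msg 4)
    = (if (pvExtractB msg 4).all (fun c => c == " ") then pvExtractB msg 3 else pvExtractB msg 4) := by
  rw [pvExtract_eq msg 4, pvExtract_eq msg 3, pvCond_eq _ (pvExtractB_inv msg 4)]

-- ===== VERDICT (by name: the statement is the Claim_ definition above) =====
theorem decompose_message_spec : Claim_equal_decompose_message := by
  intro message _
  show decompose_message message = decompose_message_alt message
  exact pvFinal (PySem.Chars.replace (PySem.Chars.lower message.toList) ['\''] [' '])
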